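-- pv_equiv track=rewrite | github.com/OxWearables/asleep | src/asleep/sleep_stats.py | get_sleep_onset_index
-- ===== SOURCE A (Python) =====
-- WAKE_LABEL = 0
--
-- def get_sleep_onset_index(sleep_stages):
--     i = 0
--     k = 0
--     threshold = 3  # epochs
--     for stage in sleep_stages:
--         if stage != WAKE_LABEL:
--             k += 1
--             if k >= threshold:
--                 break
--         else:
--             k = 0
--         i += 1
--     return i - (threshold - 1)
-- ===== SOURCE B (Python) =====
-- WAKE_LABEL = 0
--
-- def get_sleep_onset_index(sleep_stages):
--     # Windowed scan: first index j whose 3-epoch window is all non-wake;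
--     # fallback len-2 matches A's not-found / short-input behaviour.
--     for j, (a, b, c) in enumerate(zip(sleep_stages, sleep_stages[1:], sleep_stages[2:])):
--         if a != WAKE_LABEL and b != WAKE_LABEL and c != WAKE_LABEL:
--             return j
--     return len(sleep_stages) - 2
-- ===== Notes on version B (the rewrite author's own statement) =====
-- stated objective: alternative
-- what changed: Replaces the running consecutive-non-wake counter with a sliding 3-epoch window scan (zip of three shifted views) that returns the first all-non-wake window start, with len-2 as the not-found value.
import Mathlib
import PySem

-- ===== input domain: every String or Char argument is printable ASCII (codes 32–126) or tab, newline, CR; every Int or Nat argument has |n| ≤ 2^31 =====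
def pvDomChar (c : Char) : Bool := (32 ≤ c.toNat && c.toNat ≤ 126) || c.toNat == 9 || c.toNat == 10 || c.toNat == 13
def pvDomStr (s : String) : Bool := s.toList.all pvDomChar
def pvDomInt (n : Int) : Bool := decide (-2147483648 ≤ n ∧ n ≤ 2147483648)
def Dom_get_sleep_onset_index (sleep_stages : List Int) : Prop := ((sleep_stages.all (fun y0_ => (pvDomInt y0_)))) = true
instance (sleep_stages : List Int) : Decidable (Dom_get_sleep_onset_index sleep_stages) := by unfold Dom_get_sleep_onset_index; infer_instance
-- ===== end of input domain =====

-- B replaces A's running consecutive-non-wake counter by a sliding 3-window scan (alternative decomposition, same cost).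

-- ===== PORT A =====
-- A's loop: state (i, k); break when k reaches threshold 3.
def goA : List Int → Int → Int → Int
  | [], i, _ => i
  | stage :: rest, i, k =>
    if stage ≠ 0 then
      (if k + 1 ≥ 3 then i else goA rest (i + 1) (k + 1))
    else goA rest (i + 1) 0

def get_sleep_onset_index (sleep_stages : List Int) : Int :=
  goA sleep_stages 0 0 - (3 - 1)

-- ===== PORT B =====
-- B's loop over enumerate(zip(xs, xs[1:], xs[2:])): structural recursion over the
-- successive 3-windows; in the fallback branch j + remaining.length = len(xs), so the
-- value is len(xs) - 2 exactly as Source B returns.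
def goB : List Int → Int → Int
  | a :: b :: c :: rest, j =>
    if a ≠ 0 ∧ b ≠ 0 ∧ c ≠ 0 then j else goB (b :: c :: rest) (j + 1)
  | l, j => j + l.length - 2

def get_sleep_onset_index_alt (sleep_stages : List Int) : Int :=
  goB sleep_stages 0

-- ===== PRECONDITION & SPEC =====
def Spec_get_sleep_onset_index (sleep_stages : List Int) (out : Int) : Prop := out = get_sleep_onset_index_alt sleep_stages
instance (sleep_stages : List Int) (out : Int) : Decidable (Spec_get_sleep_onset_index sleep_stages out) := by unfold Spec_get_sleep_onset_index; infer_instance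

-- ===== CLAIM (what is proved, stated in full; the proofs are below) =====
def Claim_equal_get_sleep_onset_index : Prop := ∀ (sleep_stages : List Int), Dom_get_sleep_onset_index sleep_stages → Spec_get_sleep_onset_index sleep_stages (get_sleep_onset_index sleep_stages)

-- ===== LEMMAS AND PROOFS =====

lemma goB_skip_zero (t : List Int) (j : Int) : goB (0 :: t) j = goB t (j + 1) := by
  match t with
  | [] => simp [goB]
  | [b] => simp [goB]; ring
  | b :: c :: r => simp [goB]

lemma goB_skip_mid (x : Int) (t : List Int) (j : Int) :
    goB (x :: 0 :: t) j = goB (0 :: t) (j + 1) := by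
  match t with
  | [] => simp [goB]; ring
  | c :: r => simp [goB]

lemma goB_skip_third (x y : Int) (t : List Int) (j : Int) :
    goB (x :: y :: 0 :: t) j = goB (y :: 0 :: t) (j + 1) := by
  simp [goB]

lemma goB_zero_chain (p rest : List Int) (i : Int) (hl : p.length ≤ 2) :
    goB (p ++ 0 :: rest) (i - (p.length : Int)) = goB rest (i + 1) := by
  match p, hl with
  | [], _ =>
    have h := goB_skip_zero rest (i - 0)
    simpa using h
  | [x], _ =>
    show goB (x :: 0 :: rest) (i - 1) = goB rest (i + 1)
    rw [goB_skip_mid, goB_skip_zero]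
    congr 1
    ring
  | [x, y], _ =>
    show goB (x :: y :: 0 :: rest) (i - 2) = goB rest (i + 1)
    rw [goB_skip_third, goB_skip_mid, goB_skip_zero]
    congr 1
    ring

lemma goA_eq_goB (l : List Int) : ∀ (p : List Int) (i : Int),
    p.length ≤ 2 → (∀ x ∈ p, x ≠ 0) →
    goA l i (p.length : Int) = goB (p ++ l) (i - (p.length : Int)) + 2 := by
  induction l with
  | nil =>
    intro p i hlen _
    match p, hlen with
    | [], _ => simp [goA, goB]
    | [x], _ => show (i : Int) = (i - 1 + 1 - 2) + 2; ring
    | [x, y], _ => show (i : Int) = (i - 2 + 2 - 2) + 2; ring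
  | cons a rest ih =>
    intro p i hlen hnz
    by_cases ha : a = 0
    · subst ha
      have h1 : goA (0 :: rest) i (p.length : Int) = goA rest (i + 1) 0 := by
        simp [goA]
      have h2 := ih [] (i + 1) (by simp) (by simp)
      simp at h2
      rw [h1, h2, goB_zero_chain p rest i hlen]
    · by_cases hk : p.length = 2
      · match p, hk with
        | [x, y], _ =>
          have hx : x ≠ 0 := hnz x (by simp)
          have hy : y ≠ 0 := hnz y (by simp)
          have hA : goA (a :: rest) i ((2 : Nat) : Int) = i := by
            simp [goA, ha]
          have hB : goB ([x, y] ++ a :: rest) (i - 2) = i - 2 := by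
            simp [goB, hx, hy, ha]
          show goA (a :: rest) i ((2 : Nat) : Int)
            = goB ([x, y] ++ a :: rest) (i - ((2 : Nat) : Int)) + 2
          rw [hA]
          have : i - ((2 : Nat) : Int) = i - 2 := by norm_num
          rw [this, hB]
          ring
      · have step : goA (a :: rest) i (p.length : Int)
            = goA rest (i + 1) ((p.length : Int) + 1) := by
          have h3 : ¬ ((p.length : Int) + 1 ≥ 3) := by omega
          simp [goA, ha, h3]
        have hcast : (((p ++ [a]).length : Nat) : Int) = (p.length : Int) + 1 := by
          simp
        have ih' := ih (p ++ [a]) (i + 1) (by simp; omega)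
          (by intro x hx; rcases List.mem_append.1 hx with h | h
              · exact hnz x h
              · simp at h; subst h; exact ha)
        rw [step, ← hcast, ih']
        rw [List.append_assoc]
        congr 2
        simp

-- ===== VERDICT (by name: the statement is the Claim_ definition above) =====
theorem get_sleep_onset_index_spec : Claim_equal_get_sleep_onset_index := by
  intro xs _
  unfold Spec_get_sleep_onset_index get_sleep_onset_index get_sleep_onset_index_alt
  have h := goA_eq_goB xs [] 0 (by simp) (by simp)
  simp at h
  rw [h]
  ring
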